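-- pv_equiv track=rewrite | github.com/Dubeysatvik123/Vedopsopen | agents/agni.py | _generate_dockerignore
-- ===== SOURCE A (Python) =====
-- from typing import Dict, Any, List, Optional, Tuple
--
-- def _generate_dockerignore(tech_stack: List[str]) -> str:
--     """Generate .dockerignore file"""
--
--     ignore_patterns = [
--         "# Git",
--         ".git",
--         ".gitignore",
--         "",
--         "# Documentation",
--         "README.md",
--         "*.md",
--         "docs/",
--         "",
--         "# IDE",
--         ".vscode/",
--         ".idea/",
--         "*.swp",
--         "*.swo",
--         "",
--         "# OS",
--         ".DS_Store",
--         "Thumbs.db",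
--         "",
--         "# Logs",
--         "*.log",
--         "logs/",
--         "",
--         "# Testing",
--         "coverage/",
--         ".coverage",
--         ".pytest_cache/",
--         "",
--         "# Build artifacts",
--         "dist/",
--         "build/",
--         "target/"
--     ]
--
--     # Add language-specific patterns
--     if 'python' in tech_stack:
--         ignore_patterns.extend([
--             "",
--             "# Python",
--             "__pycache__/",
--             "*.pyc",
--             "*.pyo",
--             "*.pyd",
--             ".Python",
--             "env/",
--             "venv/",
--             ".venv/",
--             ".env",
--             "pip-log.txt",
--             "pip-delete-this-directory.txt",
--             ".tox/",
--             ".cache/",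
--             ".pytest_cache/",
--             "*.egg-info/"
--         ])
--
--     if any(lang in tech_stack for lang in ['javascript', 'typescript']):
--         ignore_patterns.extend([
--             "",
--             "# Node.js",
--             "node_modules/",
--             "npm-debug.log*",
--             "yarn-debug.log*",
--             "yarn-error.log*",
--             ".npm",
--             ".yarn-integrity",
--             ".next/",
--             ".nuxt/",
--             "dist/"
--         ])
--
--     if 'java' in tech_stack:
--         ignore_patterns.extend([
--             "",
--             "# Java",
--             "target/",
--             "*.class",
--             "*.jar",
--             "*.war",
--             "*.ear",
--             ".mvn/",
--             "mvnw",
--             "mvnw.cmd"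
--         ])
--
--     return "\n".join(ignore_patterns)
-- ===== SOURCE B (Python) =====
-- _BASE = "\n".join([
--     "# Git", ".git", ".gitignore", "",
--     "# Documentation", "README.md", "*.md", "docs/", "",
--     "# IDE", ".vscode/", ".idea/", "*.swp", "*.swo", "",
--     "# OS", ".DS_Store", "Thumbs.db", "",
--     "# Logs", "*.log", "logs/", "",
--     "# Testing", "coverage/", ".coverage", ".pytest_cache/", "",
--     "# Build artifacts", "dist/", "build/", "target/",
-- ])
--
-- _PY = "\n".join([
--     "", "", "# Python", "__pycache__/", "*.pyc", "*.pyo", "*.pyd", ".Python",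
--     "env/", "venv/", ".venv/", ".env", "pip-log.txt",
--     "pip-delete-this-directory.txt", ".tox/", ".cache/",
--     ".pytest_cache/", "*.egg-info/",
-- ])
--
-- _NODE = "\n".join([
--     "", "", "# Node.js", "node_modules/", "npm-debug.log*", "yarn-debug.log*",
--     "yarn-error.log*", ".npm", ".yarn-integrity", ".next/", ".nuxt/", "dist/",
-- ])
--
-- _JAVA = "\n".join([
--     "", "", "# Java", "target/", "*.class", "*.jar", "*.war", "*.ear",
--     ".mvn/", "mvnw", "mvnw.cmd",
-- ])
--
-- # All 8 possible outputs, precomputed once: key = (python?, node?, java?) flags.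
-- _TABLE = {
--     (p, n, j): _BASE + p * _PY + n * _NODE + j * _JAVA
--     for p in (0, 1) for n in (0, 1) for j in (0, 1)
-- }
--
-- def _generate_dockerignore(tech_stack):
--     """Generate .dockerignore file (O(1) lookup of a precomputed output)."""
--     s = set(tech_stack)
--     key = (int('python' in s),
--            int(not s.isdisjoint({'javascript', 'typescript'})),
--            int('java' in s))
--     return _TABLE[key]
-- ===== Notes on version B (the rewrite author's own statement) =====
-- stated objective: alternative
-- what changed: B precomputes all 8 possible .dockerignore texts once in a table keyed by the (python, node, java) flag triple (string repetition p*block instead of conditionals), so a call only computes three membership flags and does one table lookup instead of building and joining a pattern list.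
import Mathlib
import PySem

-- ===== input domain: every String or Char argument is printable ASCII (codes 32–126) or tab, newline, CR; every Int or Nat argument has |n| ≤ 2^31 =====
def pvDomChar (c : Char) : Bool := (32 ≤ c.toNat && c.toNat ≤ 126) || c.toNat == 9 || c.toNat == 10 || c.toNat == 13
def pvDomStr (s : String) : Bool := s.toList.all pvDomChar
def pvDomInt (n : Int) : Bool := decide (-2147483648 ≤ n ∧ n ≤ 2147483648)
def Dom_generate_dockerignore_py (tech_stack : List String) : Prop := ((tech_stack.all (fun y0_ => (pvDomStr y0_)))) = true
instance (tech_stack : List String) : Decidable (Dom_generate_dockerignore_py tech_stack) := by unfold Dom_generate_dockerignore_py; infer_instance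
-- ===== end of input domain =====

-- B precomputes all 8 possible outputs in a table keyed by the (python, node, java) flag triple;
-- a call reduces to computing the key and one table lookup (objective: alternative/idiomatic).

-- ===== PORT A =====
def generate_dockerignore_py (tech_stack : List String) : String :=
  let ignore_patterns : List String :=
    ["# Git", ".git", ".gitignore", "",
     "# Documentation", "README.md", "*.md", "docs/", "",
     "# IDE", ".vscode/", ".idea/", "*.swp", "*.swo", "",
     "# OS", ".DS_Store", "Thumbs.db", "",
     "# Logs", "*.log", "logs/", "",
     "# Testing", "coverage/", ".coverage", ".pytest_cache/", "",
     "# Build artifacts", "dist/", "build/", "target/"]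
  let ignore_patterns :=
    if tech_stack.contains "python" then
      ignore_patterns ++
        ["", "# Python", "__pycache__/", "*.pyc", "*.pyo", "*.pyd", ".Python",
         "env/", "venv/", ".venv/", ".env", "pip-log.txt",
         "pip-delete-this-directory.txt", ".tox/", ".cache/",
         ".pytest_cache/", "*.egg-info/"]
    else ignore_patterns
  let ignore_patterns :=
    if (["javascript", "typescript"].any (fun lang => tech_stack.contains lang)) then
      ignore_patterns ++
        ["", "# Node.js", "node_modules/", "npm-debug.log*", "yarn-debug.log*",
         "yarn-error.log*", ".npm", ".yarn-integrity", ".next/", ".nuxt/", "dist/"]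
    else ignore_patterns
  let ignore_patterns :=
    if tech_stack.contains "java" then
      ignore_patterns ++
        ["", "# Java", "target/", "*.class", "*.jar", "*.war", "*.ear",
         ".mvn/", "mvnw", "mvnw.cmd"]
    else ignore_patterns
  PySem.Str.join "\n" ignore_patterns

-- ===== PORT B =====
def pvBase : String := PySem.Str.join "\n"
  ["# Git", ".git", ".gitignore", "",
   "# Documentation", "README.md", "*.md", "docs/", "",
   "# IDE", ".vscode/", ".idea/", "*.swp", "*.swo", "",
   "# OS", ".DS_Store", "Thumbs.db", "",
   "# Logs", "*.log", "logs/", "",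
   "# Testing", "coverage/", ".coverage", ".pytest_cache/", "",
   "# Build artifacts", "dist/", "build/", "target/"]

def pvPy : String := PySem.Str.join "\n"
  ["", "", "# Python", "__pycache__/", "*.pyc", "*.pyo", "*.pyd", ".Python",
   "env/", "venv/", ".venv/", ".env", "pip-log.txt",
   "pip-delete-this-directory.txt", ".tox/", ".cache/",
   ".pytest_cache/", "*.egg-info/"]

def pvNode : String := PySem.Str.join "\n"
  ["", "", "# Node.js", "node_modules/", "npm-debug.log*", "yarn-debug.log*",
   "yarn-error.log*", ".npm", ".yarn-integrity", ".next/", ".nuxt/", "dist/"]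

def pvJava : String := PySem.Str.join "\n"
  ["", "", "# Java", "target/", "*.class", "*.jar", "*.war", "*.ear",
   ".mvn/", "mvnw", "mvnw.cmd"]

-- Python's  n * s  on a string, for n ≥ 0 (exact: concatenation of n copies)
def pvRep (n : Nat) (s : String) : String := PySem.Str.join "" (List.replicate n s)

-- _TABLE: all 8 outputs, keyed by the flag triple (comprehension over (0,1)^3)
def pvTable : PySem.Dict (Int × Int × Int) String :=
  PySem.Dict.ofList
    (([0, 1] : List Nat).flatMap (fun (p : Nat) =>
      ([0, 1] : List Nat).flatMap (fun (n : Nat) =>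
        ([0, 1] : List Nat).map (fun (j : Nat) =>
          (((p : Int), (n : Int), (j : Int)),
           pvBase ++ pvRep p pvPy ++ pvRep n pvNode ++ pvRep j pvJava)))))

def generate_dockerignore_py_alt (tech_stack : List String) : String :=
  let s := PySem.Set.ofList tech_stack
  let key : Int × Int × Int :=
    ((if PySem.Set.contains s "python" then 1 else 0),
     (if !(PySem.Set.isdisjoint s (PySem.Set.ofList ["javascript", "typescript"])) then 1 else 0),
     (if PySem.Set.contains s "java" then 1 else 0))
  -- _TABLE[key]: the key is always present (each flag is 0 or 1), so getD never takes the default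
  (PySem.Dict.get? pvTable key).getD ""

-- ===== PRECONDITION & SPEC =====
def Spec_generate_dockerignore_py (tech_stack : List String) (out : String) : Prop := out = generate_dockerignore_py_alt tech_stack
instance (tech_stack : List String) (out : String) : Decidable (Spec_generate_dockerignore_py tech_stack out) := by unfold Spec_generate_dockerignore_py; infer_instance

-- ===== CLAIM (what is proved, stated in full; the proofs are below) =====
def Claim_equal_generate_dockerignore_py : Prop := ∀ (tech_stack : List String), Dom_generate_dockerignore_py tech_stack → Spec_generate_dockerignore_py tech_stack (generate_dockerignore_py tech_stack)

-- ===== LEMMAS AND PROOFS =====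

theorem pv_set_contains (ts : List String) (x : String) :
    PySem.Set.contains (PySem.Set.ofList ts) x = ts.contains x := by
  simp only [PySem.Set.contains_eq_listContains, List.contains_eq_mem, PySem.Set.mem_ofList]

theorem pv_nondisjoint (ts : List String) (t : List String) :
    (!(PySem.Set.isdisjoint (PySem.Set.ofList ts) (PySem.Set.ofList t)))
      = t.any (fun x => ts.contains x) := by
  rw [Bool.eq_iff_iff]
  rw [Bool.not_eq_true', Bool.eq_false_iff, Ne, PySem.Set.isdisjoint_iff]
  simp [PySem.Set.mem_ofList]
  tauto

theorem pv_chars_join_app (sep : List Char) (l ys : List (List Char)) (h : l ≠ []) :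
    PySem.Chars.join sep (l ++ ([] :: ys)) =
      PySem.Chars.join sep l ++ PySem.Chars.join sep ([] :: [] :: ys) := by
  induction l with
  | nil => exact absurd rfl h
  | cons x xs ih =>
    cases xs with
    | nil =>
      cases ys with
      | nil =>
        simp [PySem.Chars.join_cons_cons, PySem.Chars.join_singleton]
      | cons y r =>
        simp [PySem.Chars.join_cons_cons, PySem.Chars.join_singleton, List.append_assoc]
    | cons x2 xs2 =>
      have ih' := ih (by simp)
      simp only [List.cons_append] at ih' ⊢
      rw [PySem.Chars.join_cons_cons, PySem.Chars.join_cons_cons, ih']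
      simp [List.append_assoc]

theorem pv_join_app (sep : String) (l ys : List String) (h : l ≠ []) :
    PySem.Str.join sep (l ++ ("" :: ys)) =
      PySem.Str.join sep l ++ PySem.Str.join sep ("" :: "" :: ys) := by
  apply String.toList_inj.mp
  simp only [String.toList_append, PySem.Str.toList_join, List.map_append, List.map_cons]
  have he : ("" : String).toList = [] := rfl
  rw [he]
  exact pv_chars_join_app sep.toList (l.map String.toList) (ys.map String.toList) (by simp [h])

theorem pvRep_zero (s : String) : pvRep 0 s = "" := rfl

theorem pvRep_one (s : String) : pvRep 1 s = s := by
  apply String.toList_inj.mp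
  simp [pvRep, PySem.Str.toList_join, PySem.Chars.join_singleton]

set_option maxHeartbeats 1000000 in
theorem pvT000 : (PySem.Dict.get? pvTable ((0:Int),(0:Int),(0:Int))).getD "" = pvBase := by
  have h : (PySem.Dict.get? pvTable ((0:Int),(0:Int),(0:Int))).getD ""
      = pvBase ++ pvRep 0 pvPy ++ pvRep 0 pvNode ++ pvRep 0 pvJava := rfl
  rw [h, pvRep_zero, pvRep_zero, pvRep_zero, String.append_empty, String.append_empty,
    String.append_empty]

set_option maxHeartbeats 1000000 in
theorem pvT100 : (PySem.Dict.get? pvTable ((1:Int),(0:Int),(0:Int))).getD "" = pvBase ++ pvPy := by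
  have h : (PySem.Dict.get? pvTable ((1:Int),(0:Int),(0:Int))).getD ""
      = pvBase ++ pvRep 1 pvPy ++ pvRep 0 pvNode ++ pvRep 0 pvJava := rfl
  rw [h, pvRep_one, pvRep_zero, pvRep_zero, String.append_empty, String.append_empty]

set_option maxHeartbeats 1000000 in
theorem pvT010 : (PySem.Dict.get? pvTable ((0:Int),(1:Int),(0:Int))).getD "" = pvBase ++ pvNode := by
  have h : (PySem.Dict.get? pvTable ((0:Int),(1:Int),(0:Int))).getD ""
      = pvBase ++ pvRep 0 pvPy ++ pvRep 1 pvNode ++ pvRep 0 pvJava := rfl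
  rw [h, pvRep_zero, pvRep_one, pvRep_zero, String.append_empty, String.append_empty]

set_option maxHeartbeats 1000000 in
theorem pvT001 : (PySem.Dict.get? pvTable ((0:Int),(0:Int),(1:Int))).getD "" = pvBase ++ pvJava := by
  have h : (PySem.Dict.get? pvTable ((0:Int),(0:Int),(1:Int))).getD ""
      = pvBase ++ pvRep 0 pvPy ++ pvRep 0 pvNode ++ pvRep 1 pvJava := rfl
  rw [h, pvRep_zero, pvRep_zero, pvRep_one, String.append_empty, String.append_empty]

set_option maxHeartbeats 1000000 in
theorem pvT110 : (PySem.Dict.get? pvTable ((1:Int),(1:Int),(0:Int))).getD "" = pvBase ++ pvPy ++ pvNode := by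
  have h : (PySem.Dict.get? pvTable ((1:Int),(1:Int),(0:Int))).getD ""
      = pvBase ++ pvRep 1 pvPy ++ pvRep 1 pvNode ++ pvRep 0 pvJava := rfl
  rw [h, pvRep_one, pvRep_one, pvRep_zero, String.append_empty]

set_option maxHeartbeats 1000000 in
theorem pvT101 : (PySem.Dict.get? pvTable ((1:Int),(0:Int),(1:Int))).getD "" = pvBase ++ pvPy ++ pvJava := by
  have h : (PySem.Dict.get? pvTable ((1:Int),(0:Int),(1:Int))).getD ""
      = pvBase ++ pvRep 1 pvPy ++ pvRep 0 pvNode ++ pvRep 1 pvJava := rfl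
  rw [h, pvRep_one, pvRep_zero, pvRep_one, String.append_empty]

set_option maxHeartbeats 1000000 in
theorem pvT011 : (PySem.Dict.get? pvTable ((0:Int),(1:Int),(1:Int))).getD "" = pvBase ++ pvNode ++ pvJava := by
  have h : (PySem.Dict.get? pvTable ((0:Int),(1:Int),(1:Int))).getD ""
      = pvBase ++ pvRep 0 pvPy ++ pvRep 1 pvNode ++ pvRep 1 pvJava := rfl
  rw [h, pvRep_zero, pvRep_one, pvRep_one, String.append_empty]

set_option maxHeartbeats 1000000 in
theorem pvT111 : (PySem.Dict.get? pvTable ((1:Int),(1:Int),(1:Int))).getD "" = pvBase ++ pvPy ++ pvNode ++ pvJava := by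
  have h : (PySem.Dict.get? pvTable ((1:Int),(1:Int),(1:Int))).getD ""
      = pvBase ++ pvRep 1 pvPy ++ pvRep 1 pvNode ++ pvRep 1 pvJava := rfl
  rw [h, pvRep_one, pvRep_one, pvRep_one]

set_option maxHeartbeats 1000000 in
set_option maxRecDepth 8192 in
theorem generate_dockerignore_py_eq_alt (tech_stack : List String) :
    generate_dockerignore_py tech_stack = generate_dockerignore_py_alt tech_stack := by
  unfold generate_dockerignore_py generate_dockerignore_py_alt
  simp only [pv_set_contains, pv_nondisjoint, List.any_cons, List.any_nil, Bool.or_false]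
  by_cases hp : tech_stack.contains "python" = true <;>
    by_cases hj : tech_stack.contains "javascript" = true <;>
      by_cases ht : tech_stack.contains "typescript" = true <;>
        by_cases hv : tech_stack.contains "java" = true <;>
          simp only [hp, hj, ht, hv, Bool.or_self, Bool.or_true, Bool.or_false,
            Bool.false_eq_true, if_true, if_false] <;>
          first
            | (rw [pvT000]; rfl)
            | (rw [pvT100]; rw [pv_join_app _ _ _ (by simp)]; rfl)
            | (rw [pvT010]; rw [pv_join_app _ _ _ (by simp)]; rfl)
            | (rw [pvT001]; rw [pv_join_app _ _ _ (by simp)]; rfl)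
            | (rw [pvT110]; rw [pv_join_app _ _ _ (by simp), pv_join_app _ _ _ (by simp)]; rfl)
            | (rw [pvT101]; rw [pv_join_app _ _ _ (by simp), pv_join_app _ _ _ (by simp)]; rfl)
            | (rw [pvT011]; rw [pv_join_app _ _ _ (by simp), pv_join_app _ _ _ (by simp)]; rfl)
            | (rw [pvT111]; rw [pv_join_app _ _ _ (by simp), pv_join_app _ _ _ (by simp),
                pv_join_app _ _ _ (by simp)]; rfl)

-- ===== VERDICT (by name: the statement is the Claim_ definition above) =====
theorem generate_dockerignore_py_spec : Claim_equal_generate_dockerignore_py := by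
  intro ts _
  exact generate_dockerignore_py_eq_alt ts
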